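-- pv_equiv track=rewrite | github.com/jiajunz/HuntCoding | lib/huntcoding/python/HCUtility.py | hc_splitcode
-- ===== SOURCE A (Python) =====
-- def hc_splitcode(code):
--     codes = code.split('\n');
--     result = []
--     currline = ""
--     for line in codes:
--         if line.startswith('def '):
--             if(currline!="") :
--                 result.append(currline)
--             currline = line+'\n'
--         else:
--             currline +=line+'\n'
--     if(currline!=""):
--         result.append(currline)
--     return result
-- ===== SOURCE B (Python) =====
-- def hc_splitcode(code):
--     # Right-to-left single pass: walk the lines in reverse, collecting the lines
--     # of the current chunk; a 'def ' line closes (and starts) a chunk.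
--     lines = code.split('\n')
--     chunks = []
--     cur = []
--     for line in reversed(lines):
--         cur.append(line)
--         if line.startswith('def '):
--             chunks.append(''.join(x + '\n' for x in reversed(cur)))
--             cur = []
--     chunks.reverse()
--     if cur:
--         chunks.insert(0, ''.join(x + '\n' for x in reversed(cur)))
--     return chunks
-- ===== Notes on version B (the rewrite author's own statement) =====
-- stated objective: alternative
-- what changed: A builds chunks left-to-right by growing a string accumulator and flushing it at each def line; B walks the lines right-to-left collecting the current chunk's lines in a list, closing a chunk exactly when it reaches the 'def ' line that starts it, then reverses the chunk list.
import Mathlib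
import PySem

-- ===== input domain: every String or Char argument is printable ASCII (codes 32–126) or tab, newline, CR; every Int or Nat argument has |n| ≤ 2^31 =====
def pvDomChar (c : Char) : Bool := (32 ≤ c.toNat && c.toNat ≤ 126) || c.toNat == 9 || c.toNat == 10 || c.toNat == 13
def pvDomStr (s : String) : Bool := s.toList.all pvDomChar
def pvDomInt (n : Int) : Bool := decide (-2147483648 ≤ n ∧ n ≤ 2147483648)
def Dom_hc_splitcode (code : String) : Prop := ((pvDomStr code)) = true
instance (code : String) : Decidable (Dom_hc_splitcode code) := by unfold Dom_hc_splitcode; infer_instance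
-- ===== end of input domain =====

-- B replaces A's left-to-right string-accumulator state machine by a reverse single pass that
-- collects each chunk's lines and closes a chunk at its 'def ' line; same cost, different structure.

-- ===== PORT A =====
def hc_splitcode (code : String) : List String :=
  let codes := (PySem.Str.split? code "\n").getD []   -- sep is the literal "\n" ≠ "", so split? is always `some`
  let p := codes.foldl
    (fun (st : List String × String) line =>
      if PySem.Str.startswith line "def " then
        ((if st.2 ≠ "" then st.1 ++ [st.2] else st.1), line ++ "\n")
      else
        (st.1, st.2 ++ (line ++ "\n")))
    ([], "")
  if p.2 ≠ "" then p.1 ++ [p.2] else p.1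

-- ===== PORT B =====
def hc_splitcode_alt (code : String) : List String :=
  let lines := (PySem.Str.split? code "\n").getD []   -- sep is the literal "\n" ≠ "", so split? is always `some`
  let p := lines.reverse.foldl
    (fun (st : List String × List String) line =>
      let cur := st.2 ++ [line]
      if PySem.Str.startswith line "def " then
        (st.1 ++ [PySem.Str.join "" (cur.reverse.map (fun x => x ++ "\n"))], [])
      else
        (st.1, cur))
    ([], [])
  let chunks := p.1.reverse
  if p.2 ≠ [] then PySem.Str.join "" (p.2.reverse.map (fun x => x ++ "\n")) :: chunks else chunks

-- ===== PRECONDITION & SPEC =====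
def Spec_hc_splitcode (code : String) (out : List String) : Prop := out = hc_splitcode_alt code
instance (code : String) (out : List String) : Decidable (Spec_hc_splitcode code out) := by unfold Spec_hc_splitcode; infer_instance

-- ===== CLAIM (what is proved, stated in full; the proofs are below) =====
def Claim_equal_hc_splitcode : Prop := ∀ (code : String), Dom_hc_splitcode code → Spec_hc_splitcode code (hc_splitcode code)

-- ===== LEMMAS AND PROOFS =====

-- join of the (·++"\n")-mapped lines, as both ports compute it
def joinNl (xs : List String) : String := PySem.Str.join "" (xs.map (fun x => x ++ "\n"))

theorem intercalate_nilsep_cons (x : List Char) (xs : List (List Char)) :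
    ([] : List Char).intercalate (x :: xs) = x ++ ([] : List Char).intercalate xs := by
  cases xs <;> simp [List.intercalate]

theorem strjoin_empty_nil : PySem.Str.join "" ([] : List String) = "" := by
  apply String.ext
  simp [PySem.Str.join, PySem.Chars.join, List.intercalate]

theorem strjoin_empty_cons (x : String) (xs : List String) :
    PySem.Str.join "" (x :: xs) = x ++ PySem.Str.join "" xs := by
  apply String.ext
  simp [PySem.Str.join, PySem.Chars.join, intercalate_nilsep_cons]

theorem append_newline_ne_empty (s : String) : s ++ "\n" ≠ "" := by
  intro h
  have h2 := congrArg String.toList h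
  simp at h2

-- A's loop body and finalization, named for the proofs
def stepA (st : List String × String) (line : String) : List String × String :=
  if PySem.Str.startswith line "def " then
    ((if st.2 ≠ "" then st.1 ++ [st.2] else st.1), line ++ "\n")
  else
    (st.1, st.2 ++ (line ++ "\n"))

def finA (p : List String × String) : List String :=
  if p.2 ≠ "" then p.1 ++ [p.2] else p.1

-- B's loop body and finalization, named for the proofs
def stepB (st : List String × List String) (line : String) : List String × List String :=
  let cur := st.2 ++ [line]
  if PySem.Str.startswith line "def " then
    (st.1 ++ [PySem.Str.join "" (cur.reverse.map (fun x => x ++ "\n"))], [])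
  else
    (st.1, cur)

def finB (p : List String × List String) : List String :=
  if p.2 ≠ [] then PySem.Str.join "" (p.2.reverse.map (fun x => x ++ "\n")) :: p.1.reverse
  else p.1.reverse

-- A's loop as structural recursion on the remaining lines
def fA (cur : String) (ls : List String) : List String :=
  match ls with
  | [] => if cur ≠ "" then [cur] else []
  | l :: ls =>
    if PySem.Str.startswith l "def " then
      (if cur ≠ "" then [cur] else []) ++ fA (l ++ "\n") ls
    else
      fA (cur ++ (l ++ "\n")) ls

-- B's pass, as a clean right fold producing (chunks, pending-lines)
def BK (ls : List String) : List String × List String :=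
  ls.foldr
    (fun l st =>
      if PySem.Str.startswith l "def " then ((joinNl (l :: st.2)) :: st.1, [])
      else (st.1, l :: st.2))
    ([], [])

theorem BK_cons (l : String) (ls : List String) :
    BK (l :: ls) =
      if PySem.Str.startswith l "def " then ((joinNl (l :: (BK ls).2)) :: (BK ls).1, [])
      else ((BK ls).1, l :: (BK ls).2) := rfl

theorem fA_spec (ls : List String) : ∀ (res : List String) (cur : String),
    finA (List.foldl stepA (res, cur) ls) = res ++ fA cur ls := by
  induction ls with
  | nil =>
    intro res cur
    simp only [List.foldl_nil, finA, fA]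
    split_ifs <;> simp
  | cons l ls ih =>
    intro res cur
    rw [List.foldl_cons]
    by_cases h : PySem.Chars.startswith l.toList ['d', 'e', 'f', ' '] = true
    · by_cases hc : cur = ""
      · have hs : stepA (res, cur) l = (res, l ++ "\n") := by simp [stepA, h, hc]
        rw [hs, ih]
        simp [fA, h, hc]
      · have hs : stepA (res, cur) l = (res ++ [cur], l ++ "\n") := by simp [stepA, h, hc]
        rw [hs, ih]
        simp [fA, h, hc]
    · have hs : stepA (res, cur) l = (res, cur ++ (l ++ "\n")) := by simp [stepA, h]
      rw [hs, ih]
      simp [fA, h]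

theorem BK_spec (ls : List String) :
    List.foldl stepB ([], []) ls.reverse = ((BK ls).1.reverse, (BK ls).2.reverse) := by
  rw [List.foldl_reverse]
  induction ls with
  | nil => simp [BK]
  | cons l ls ih =>
    rw [List.foldr_cons, ih]
    by_cases h : PySem.Chars.startswith l.toList ['d', 'e', 'f', ' '] = true
    · simp [stepB, h, BK_cons, joinNl]
    · simp [stepB, h, BK_cons]

theorem main_lemma (ls : List String) : ∀ (acc : String), acc ≠ "" →
    fA acc ls = (acc ++ joinNl (BK ls).2) :: (BK ls).1 := by
  induction ls with
  | nil =>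
    intro acc hacc
    simp [fA, hacc, BK, joinNl, strjoin_empty_nil]
  | cons l ls ih =>
    intro acc hacc
    by_cases h : PySem.Chars.startswith l.toList ['d', 'e', 'f', ' '] = true
    · simp only [fA]
      rw [ih (l ++ "\n") (append_newline_ne_empty l), BK_cons]
      simp [h, hacc, joinNl, strjoin_empty_nil, strjoin_empty_cons, String.append_assoc]
    · simp only [fA]
      rw [ih (acc ++ (l ++ "\n")) (by
        intro hcontra
        have h2 := congrArg String.toList hcontra
        simp at h2), BK_cons]
      simp [h, joinNl, strjoin_empty_cons, String.append_assoc]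

-- ===== VERDICT (by name: the statement is the Claim_ definition above) =====
theorem hc_splitcode_spec : Claim_equal_hc_splitcode := by
  intro code _
  show hc_splitcode code = hc_splitcode_alt code
  have hA : hc_splitcode code
      = finA (List.foldl stepA ([], "") ((PySem.Str.split? code "\n").getD [])) := rfl
  have hB : hc_splitcode_alt code
      = finB (List.foldl stepB ([], []) ((PySem.Str.split? code "\n").getD []).reverse) := rfl
  rw [hA, hB]
  generalize (PySem.Str.split? code "\n").getD [] = lines
  rw [fA_spec lines [] "", BK_spec lines]
  cases lines with
  | nil => simp [fA, BK, finB]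
  | cons l ls =>
    have hfa : fA "" (l :: ls) = fA (l ++ "\n") ls := by
      by_cases h : PySem.Chars.startswith l.toList ['d', 'e', 'f', ' '] = true
      · simp [fA, h]
      · simp [fA, h]
    rw [hfa, main_lemma ls (l ++ "\n") (append_newline_ne_empty l), BK_cons]
    by_cases h : PySem.Chars.startswith l.toList ['d', 'e', 'f', ' '] = true
    · simp [h, finB, joinNl, strjoin_empty_cons, String.append_assoc]
    · simp [h, finB, joinNl, strjoin_empty_cons, String.append_assoc]
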